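-- pv_equiv track=rewrite | github.com/shohei-kojima/Filo_Paramyxo_2023 | scripts/Filo.py | motif_formatter2
-- ===== SOURCE A (Python) =====
-- def motif_formatter2(seq, _from, _to):
--     if _to == 0:
--         tmp=seq[_from:]
--     else:
--         tmp=seq[_from:_to]
--     tmp2=[]
--     for n,c in enumerate(tmp):
--         if (n > 0) and (n % 6 == 0):
--             tmp2.append(' ')
--         tmp2.append(c)
--     return ''.join(tmp2).replace('T', 'U')
-- ===== SOURCE B (Python) =====
-- def motif_formatter2(seq, _from, _to):
--     if _to == 0:
--         tmp = seq[_from:]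
--     else:
--         tmp = seq[_from:_to]
--     chunks = [tmp[i:i + 6] for i in range(0, len(tmp), 6)]
--     return ' '.join(chunks).replace('T', 'U')
-- ===== Notes on version B (the rewrite author's own statement) =====
-- stated objective: simpler
-- what changed: Instead of enumerating individual characters and appending a space whenever the index is a positive multiple of 6, B strides over chunk start indices in steps of 6, slices fixed-size 6-character chunks and lets ' '.join insert the separators.
import Mathlib
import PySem

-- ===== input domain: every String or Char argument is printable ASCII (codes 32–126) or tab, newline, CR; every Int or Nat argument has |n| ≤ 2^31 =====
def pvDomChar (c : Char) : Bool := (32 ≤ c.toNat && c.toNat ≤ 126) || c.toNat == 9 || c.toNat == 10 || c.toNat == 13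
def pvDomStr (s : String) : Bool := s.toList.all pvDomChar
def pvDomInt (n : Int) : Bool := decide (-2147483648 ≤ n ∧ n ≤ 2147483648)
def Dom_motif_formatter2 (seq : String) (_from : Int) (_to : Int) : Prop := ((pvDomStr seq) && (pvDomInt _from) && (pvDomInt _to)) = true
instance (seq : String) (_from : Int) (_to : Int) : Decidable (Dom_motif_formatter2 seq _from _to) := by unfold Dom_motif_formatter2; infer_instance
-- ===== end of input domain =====

-- B replaces A's per-character enumerate loop (space when index is a positive multiple of 6)
-- by striding over chunk start indices in steps of 6 and joining 6-char slices with ' ' (objective: simpler).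


-- ===== PORT A =====
-- the body of A's for-loop: append ' ' when (n > 0) and (n % 6 == 0), then append c
def pvStepA (acc : List Char) (p : Int × Char) : List Char :=
  (if 0 < p.1 && PySem.Int.mod p.1 6 == 0 then acc ++ [' '] else acc) ++ [p.2]

def motif_formatter2 (seq : String) (_from : Int) (_to : Int) : String :=
  let tmp := if _to == 0 then PySem.Str.slice seq (some _from) none
             else PySem.Str.slice seq (some _from) (some _to)
  let tmp2 := (PySem.List.enumerate tmp.toList 0).foldl pvStepA ([] : List Char)
  PySem.Str.replace (String.ofList tmp2) "T" "U"

-- ===== PORT B =====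
def motif_formatter2_alt (seq : String) (_from : Int) (_to : Int) : String :=
  let tmp := if _to == 0 then PySem.Str.slice seq (some _from) none
             else PySem.Str.slice seq (some _from) (some _to)
  let chunks := (PySem.List.pyRange 0 (PySem.Str.len tmp) 6).map
      (fun i => PySem.Str.slice tmp (some i) (some (i + 6)))
  PySem.Str.replace (PySem.Str.join " " chunks) "T" "U"

-- ===== PRECONDITION & SPEC =====
def Spec_motif_formatter2 (seq : String) (_from : Int) (_to : Int) (out : String) : Prop := out = motif_formatter2_alt seq _from _to
instance (seq : String) (_from : Int) (_to : Int) (out : String) : Decidable (Spec_motif_formatter2 seq _from _to out) := by unfold Spec_motif_formatter2; infer_instance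

-- ===== CLAIM (what is proved, stated in full; the proofs are below) =====
def Claim_equal_motif_formatter2 : Prop := ∀ (seq : String) (_from : Int) (_to : Int), Dom_motif_formatter2 seq _from _to → Spec_motif_formatter2 seq _from _to (motif_formatter2 seq _from _to)

-- ===== LEMMAS AND PROOFS =====

-- reference form of A's loop: a space before each element at a positive index divisible by 6
def pvSp (s : Int) : List Char → List Char
  | [] => []
  | c :: cs => (if 0 < s ∧ 6 ∣ s then [' '] else []) ++ c :: pvSp (s + 1) cs

-- the chunking both sides boil down to
def pvChunks (cs : List Char) : List (List Char) :=
  if h : cs = [] then [] else cs.take 6 :: pvChunks (cs.drop 6)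
termination_by cs.length
decreasing_by
  cases cs with
  | nil => exact absurd rfl h
  | cons a l => simp

theorem pvMod6 (a : Int) : PySem.Int.mod a 6 = a % 6 := by
  simp [PySem.Int.mod, Int.fmod_eq_emod]

theorem pvFoldA (cs : List Char) (s : Int) (acc : List Char) :
    (PySem.List.enumerate cs s).foldl pvStepA acc = acc ++ pvSp s cs := by
  induction cs generalizing s acc with
  | nil => simp [PySem.List.enumerate_nil, pvSp]
  | cons c cs ih =>
      rw [PySem.List.enumerate_cons, List.foldl_cons, ih]
      have hcond : (0 < s && PySem.Int.mod s 6 == 0) = decide (0 < s ∧ (6:Int) ∣ s) := by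
        rw [pvMod6]
        by_cases h1 : 0 < s <;> by_cases h2 : (6:Int) ∣ s
        · have h0 : s % 6 = 0 := Int.emod_eq_zero_of_dvd h2
          simp [h1, h2, h0]
        · have h0 : ¬ s % 6 = 0 := fun h0 => h2 (Int.dvd_of_emod_eq_zero h0)
          simp [h1, h2, h0]
        · simp [h1, h2]
        · have h0 : ¬ s % 6 = 0 := fun h0 => h2 (Int.dvd_of_emod_eq_zero h0)
          simp [h1, h2, h0]
      simp only [pvStepA, hcond, pvSp]
      by_cases h : 0 < s ∧ (6:Int) ∣ s <;> simp [h]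

theorem pvSp_append (xs ys : List Char) (s : Int) :
    pvSp s (xs ++ ys) = pvSp s xs ++ pvSp (s + xs.length) ys := by
  induction xs generalizing s with
  | nil => simp [pvSp]
  | cons c xs ih =>
      have harg : s + 1 + (xs.length : Int) = s + ((c :: xs).length : Int) := by
        push_cast [List.length_cons]; omega
      simp only [List.cons_append, pvSp, ih (s + 1), harg]
      simp

theorem pvSp_no_space (xs : List Char) (s : Int) (j : Nat) (hmod : s % 6 = j)
    (hj : 1 ≤ j) (hlen : j + xs.length ≤ 6) : pvSp s xs = xs := by
  induction xs generalizing s j with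
  | nil => simp [pvSp]
  | cons c xs ih =>
      have hne : ¬ (0 < s ∧ (6:Int) ∣ s) := by
        rintro ⟨-, h0⟩; omega
      simp only [pvSp, hne, if_false, List.nil_append]
      cases xs with
      | nil => simp [pvSp]
      | cons d ds =>
          have hl : (j + 1) + (d :: ds).length ≤ 6 := by
            simp at hlen ⊢; omega
          have hj4 : j ≤ 4 := by simp at hlen; omega
          have hmod' : (s + 1) % 6 = ((j + 1 : Nat) : Int) := by push_cast; omega
          rw [ih (s + 1) (j + 1) hmod' (by omega) hl]

theorem pvChunks_cons (c : Char) (cs : List Char) :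
    pvChunks (c :: cs) = (c :: cs.take 5) :: pvChunks (cs.drop 5) := by
  rw [pvChunks]
  simp

theorem pvSp_mult (cs : List Char) (s : Int) (hs : 0 < s) (hmod : s % 6 = 0) :
    pvSp s cs = (pvChunks cs).flatMap (fun c => ' ' :: c) := by
  induction hn : cs.length using Nat.strong_induction_on generalizing cs s with
  | _ n ih =>
    cases cs with
    | nil => simp [pvSp, pvChunks]
    | cons c cs' =>
        have hn' : cs'.length + 1 = n := by simpa using hn
        have hsp : pvSp s (c :: cs') = ' ' :: c :: pvSp (s + 1) cs' := by
          have : (0 < s ∧ (6:Int) ∣ s) := by constructor <;> omega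
          simp [pvSp, this]
        rw [hsp, pvChunks_cons]
        rw [show pvSp (s + 1) cs'
              = pvSp (s + 1) (cs'.take 5) ++ pvSp (s + 1 + (cs'.take 5).length) (cs'.drop 5) by
          conv_lhs => rw [← List.take_append_drop 5 cs']
          exact pvSp_append _ _ _]
        rw [pvSp_no_space (cs'.take 5) (s + 1) 1 (by omega) (by omega)
          (by simp [List.length_take]; omega)]
        by_cases hlen : cs'.length ≤ 5
        · simp [List.drop_eq_nil_of_le hlen, pvSp, pvChunks, List.take_of_length_le hlen]
        · have htk : s + 1 + ((cs'.take 5).length : Int) = s + 6 := by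
            have h5 : (cs'.take 5).length = 5 := by simp [List.length_take]; omega
            rw [h5]; push_cast; omega
          rw [htk, ih ((cs'.drop 5).length) (by rw [List.length_drop]; omega)
            (cs'.drop 5) (s + 6) (by omega) (by omega) rfl]
          simp

theorem pvJoin_cons (x : List Char) (rest : List (List Char)) :
    PySem.Chars.join [' '] (x :: rest) = x ++ rest.flatMap (fun c => ' ' :: c) := by
  induction rest generalizing x with
  | nil => simp [PySem.Chars.join_singleton]
  | cons y rest ih =>
      rw [PySem.Chars.join_cons_cons, ih y]
      simp

theorem pvSp_zero (cs : List Char) :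
    pvSp 0 cs = PySem.Chars.join [' '] (pvChunks cs) := by
  cases cs with
  | nil => simp [pvSp, pvChunks, PySem.Chars.join_nil]
  | cons c cs' =>
      rw [pvChunks_cons, pvJoin_cons]
      have hsp : pvSp 0 (c :: cs') = c :: pvSp 1 cs' := by simp [pvSp]
      rw [hsp]
      rw [show pvSp 1 cs'
            = pvSp 1 (cs'.take 5) ++ pvSp (1 + (cs'.take 5).length) (cs'.drop 5) by
        conv_lhs => rw [← List.take_append_drop 5 cs']
        exact pvSp_append _ _ _]
      rw [pvSp_no_space (cs'.take 5) 1 1 (by omega) (by omega)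
        (by simp [List.length_take]; omega)]
      by_cases hlen : cs'.length ≤ 5
      · simp [List.drop_eq_nil_of_le hlen, pvSp, pvChunks, List.take_of_length_le hlen]
      · have htk : 1 + ((cs'.take 5).length : Int) = 6 := by
          have : (cs'.take 5).length = 5 := by simp [List.length_take]; omega
          rw [this]; norm_num
        rw [htk, pvSp_mult (cs'.drop 5) 6 (by omega) (by omega)]
        simp

theorem pvRange6_cons (a b : Int) (h : a < b) :
    PySem.List.pyRange a b 6 = a :: PySem.List.pyRange (a + 6) b 6 := by
  rw [PySem.List.pyRange_of_pos a b (by omega), PySem.List.pyRange_of_pos (a + 6) b (by omega)]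
  by_cases h6 : a + 6 < b
  · have hN : ((b - a + 6 - 1) / 6).toNat = ((b - (a + 6) + 6 - 1) / 6).toNat + 1 := by omega
    simp only [h, if_true, h6, if_true, hN, List.range_succ_eq_map, List.map_cons, List.map_map]
    rw [Nat.cast_zero, mul_zero, add_zero]
    congr 1
    refine List.map_congr_left fun k _ => ?_
    simp only [Function.comp_apply]
    push_cast; ring
  · have hN : ((b - a + 6 - 1) / 6).toNat = 1 := by omega
    simp [h, h6, hN]

theorem pvChunksB (sigma : List Char) (a : Nat) :
    (PySem.List.pyRange (a : Int) sigma.length 6).map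
      (fun i => PySem.List.slice sigma (some i) (some (i + 6))) = pvChunks (sigma.drop a) := by
  induction hn : sigma.length - a using Nat.strong_induction_on generalizing a with
  | _ n ih =>
    by_cases h : a < sigma.length
    · rw [pvRange6_cons _ _ (by exact_mod_cast h), List.map_cons]
      have hslice : PySem.List.slice sigma (some (a : Int)) (some ((a : Int) + 6))
          = (sigma.drop a).take 6 := by
        have := PySem.List.slice_natCast_add (xs := sigma) (j := a) (n := 6)
        simpa using this
      rw [hslice]
      have hcast : ((a : Int) + 6) = ((a + 6 : Nat) : Int) := by push_cast; ring
      rw [hcast, ih (sigma.length - (a + 6)) (by omega) (a + 6) rfl]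
      have hdrop : sigma.drop (a + 6) = (sigma.drop a).drop 6 := by
        simp [List.drop_drop]
      rw [hdrop]
      have hne : sigma.drop a ≠ [] := by
        simp only [ne_eq, List.drop_eq_nil_iff, not_le]
        omega
      conv_rhs => rw [pvChunks]
      simp [hne]
    · have h1 : PySem.List.pyRange (a : Int) sigma.length 6 = [] := by
        rw [PySem.List.pyRange_of_pos _ _ (by omega : (0:Int) < 6)]
        have : ¬ ((a : Int) < sigma.length) := by exact_mod_cast h
        simp [this]
      have h2 : sigma.drop a = [] := List.drop_eq_nil_of_le (by omega)
      rw [h1, h2, pvChunks]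
      simp

theorem pvMain (tmp : String) :
    String.ofList ((PySem.List.enumerate tmp.toList 0).foldl pvStepA []) =
    PySem.Str.join " " ((PySem.List.pyRange 0 (PySem.Str.len tmp) 6).map
      (fun i => PySem.Str.slice tmp (some i) (some (i + 6)))) := by
  have hA : (PySem.List.enumerate tmp.toList 0).foldl pvStepA [] =
      PySem.Chars.join [' '] (pvChunks tmp.toList) := by
    rw [pvFoldA, pvSp_zero]; rfl
  have hB : (PySem.Str.join " " ((PySem.List.pyRange 0 (PySem.Str.len tmp) 6).map
      (fun i => PySem.Str.slice tmp (some i) (some (i + 6))))).toList =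
      PySem.Chars.join [' '] (pvChunks tmp.toList) := by
    rw [PySem.Str.toList_join, List.map_map]
    have hmap : (String.toList ∘ fun i => PySem.Str.slice tmp (some i) (some (i + 6)))
        = fun i => PySem.List.slice tmp.toList (some i) (some (i + 6)) := by
      funext i
      simp [PySem.Str.toList_slice]
    rw [hmap, PySem.Str.len_eq]
    have h0 : ((0 : Nat) : Int) = 0 := rfl
    rw [← h0, pvChunksB tmp.toList 0, List.drop_zero]
    rfl
  calc String.ofList ((PySem.List.enumerate tmp.toList 0).foldl pvStepA [])
      = String.ofList ((PySem.Str.join " " ((PySem.List.pyRange 0 (PySem.Str.len tmp) 6).map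
          (fun i => PySem.Str.slice tmp (some i) (some (i + 6))))).toList) := by rw [hA, hB]
    _ = _ := String.ofList_toList

-- ===== VERDICT (by name: the statement is the Claim_ definition above) =====
theorem motif_formatter2_spec : Claim_equal_motif_formatter2 := by
  intro seq _from _to _
  unfold Spec_motif_formatter2 motif_formatter2 motif_formatter2_alt
  exact congrArg (fun s => PySem.Str.replace s "T" "U") (pvMain _)
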